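-- pv_equiv track=rewrite | github.com/yunu7067/problem-solving | 백준/Silver/10816. 숫자 카드 2/숫자 카드 2.py | upper_bisect
-- ===== SOURCE A (Python) =====
-- def upper_bisect(a, target):
--     start, end = 0, len(a) - 1
--
--     while start <= end:
--         mid = (start + end) // 2
--         if a[mid] > target:
--             end = mid - 1
--         else:
--             start = mid + 1
--     return start
-- ===== SOURCE B (Python) =====
-- def upper_bisect(a, target):
--     # Single linear pass: the upper-bound insertion index in a sorted list
--     # equals the number of elements <= target.
--     count = 0
--     for x in a:
--         if x <= target:
--             count += 1
--     return count
-- ===== Notes on version B (the rewrite author's own statement) =====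
-- stated objective: simpler
-- what changed: Replaces the iterative binary search with a single linear pass counting elements <= target; on lists partitioned about target (e.g. any sorted list) this count equals the upper-bound index A computes.
-- outside the precondition, e.g. on upper_bisect([2, 1], 1): A returns 0, B returns 1
import Mathlib
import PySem

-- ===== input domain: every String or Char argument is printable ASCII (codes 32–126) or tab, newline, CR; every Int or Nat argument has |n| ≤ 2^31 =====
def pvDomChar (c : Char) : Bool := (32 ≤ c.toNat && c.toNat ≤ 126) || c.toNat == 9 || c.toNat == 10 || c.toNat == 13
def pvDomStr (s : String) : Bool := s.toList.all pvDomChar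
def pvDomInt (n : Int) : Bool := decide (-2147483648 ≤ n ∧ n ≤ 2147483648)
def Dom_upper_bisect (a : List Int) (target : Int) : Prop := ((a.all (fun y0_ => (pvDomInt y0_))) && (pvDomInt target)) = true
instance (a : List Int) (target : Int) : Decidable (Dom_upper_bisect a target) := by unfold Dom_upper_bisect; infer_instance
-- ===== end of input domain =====

-- B replaces the binary search with a single linear pass counting elements ≤ target (simpler, not faster).


-- ===== PORT A =====
-- the while loop of A; A never hits an IndexError (mid stays in [start,end] ⊆ [0,len-1]),
-- so the 'none' branch of pyGet? is unreachable and returns a junk 0.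
def upperLoop (a : List Int) (target : Int) (start endi : Int) : Int :=
  if h : start ≤ endi then
    let mid := PySem.Int.floordiv (start + endi) 2
    match PySem.List.pyGet? a mid with
    | some v =>
        if v > target then upperLoop a target start (mid - 1)
        else upperLoop a target (mid + 1) endi
    | none => 0
  else start
termination_by (endi - start + 1).toNat
decreasing_by
  · have := PySem.Int.floordiv_two_mid_bounds h
    omega
  · have := PySem.Int.floordiv_two_mid_bounds h
    omega

def upper_bisect (a : List Int) (target : Int) : Int :=
  upperLoop a target 0 ((a.length : Int) - 1)

-- ===== PORT B =====
def upper_bisect_alt (a : List Int) (target : Int) : Int :=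
  a.foldl (fun count x => if x ≤ target then count + 1 else count) 0

-- ===== PRECONDITION & SPEC =====
-- Pre_ restricts to the natural domain of binary search: lists partitioned about
-- target (every element ≤ target precedes every element > target; any sorted list
-- qualifies). On other lists A still returns, but its value is an artefact of the
-- bisection path and not the upper-bound insertion index the function is for.
def Pre_upper_bisect (a : List Int) (target : Int) : Prop :=
  a.Pairwise (fun x y => y ≤ target → x ≤ target)
instance (a : List Int) (target : Int) : Decidable (Pre_upper_bisect a target) := by unfold Pre_upper_bisect; infer_instance

def pvWitness_upper_bisect : List Int × Int := ([1, 2, 2, 5], 2)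

def Spec_upper_bisect (a : List Int) (target : Int) (out : Int) : Prop := out = upper_bisect_alt a target
instance (a : List Int) (target : Int) (out : Int) : Decidable (Spec_upper_bisect a target out) := by unfold Spec_upper_bisect; infer_instance

-- ===== CLAIM (what is proved, stated in full; the proofs are below) =====
def Claim_equal_upper_bisect : Prop := ∀ (a : List Int) (target : Int), Dom_upper_bisect a target → Pre_upper_bisect a target → Spec_upper_bisect a target (upper_bisect a target)

-- ===== LEMMAS AND PROOFS =====

theorem foldl_count_acc (target : Int) (l : List Int) (c : Int) :
    l.foldl (fun count x => if x ≤ target then count + 1 else count) c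
      = c + (l.countP (fun x => decide (x ≤ target)) : Int) := by
  induction l generalizing c with
  | nil => simp
  | cons x xs ih =>
      simp only [List.foldl_cons, List.countP_cons, ih]
      by_cases hx : x ≤ target
      · simp [hx]; omega
      · simp [hx]

theorem countP_of_split (target : Int) (a : List Int) (s : Nat) (hs : s ≤ a.length)
    (hlo : ∀ i : Nat, (hi : i < a.length) → i < s → a[i] ≤ target)
    (hhi : ∀ i : Nat, (hi : i < a.length) → s ≤ i → target < a[i]) :
    a.countP (fun x => decide (x ≤ target)) = s := by
  induction a generalizing s with
  | nil => simp_all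
  | cons x xs ih =>
      cases s with
      | zero =>
          have h0 : target < x := hhi 0 (by simp) (by omega)
          simp only [List.countP_cons]
          rw [ih 0 (by omega)]
          · simp [not_le.mpr h0]
          · intro i hi his; omega
          · intro i hi _
            exact hhi (i + 1) (by simpa using hi) (by omega)
      | succ s' =>
          have h0 : x ≤ target := hlo 0 (by simp) (by omega)
          simp only [List.countP_cons]
          rw [ih s' (by simpa using hs)]
          · simp [h0]
          · intro i hi his
            exact hlo (i + 1) (by simpa using hi) (by omega)
          · intro i hi his
            exact hhi (i + 1) (by simpa using hi) (by omega)

theorem upperLoop_eq (a : List Int) (target : Int)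
    (hsort : a.Pairwise (fun x y => y ≤ target → x ≤ target)) :
    ∀ s e : Int, 0 ≤ s → s ≤ e + 1 → e ≤ (a.length : Int) - 1 →
    (∀ i : Nat, (hi : i < a.length) → (i : Int) < s → a[i] ≤ target) →
    (∀ i : Nat, (hi : i < a.length) → e < (i : Int) → target < a[i]) →
    upperLoop a target s e = a.countP (fun x => decide (x ≤ target)) := by
  have hpair := List.pairwise_iff_getElem.mp hsort
  intro s e
  induction hm : (e - s + 1).toNat using Nat.strong_induction_on generalizing s e with
  | _ m ih =>
  intro hs0 hse hel hlo hhi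
  rw [upperLoop]
  by_cases h : s ≤ e
  · simp only [dif_pos h]
    have hmid := PySem.Int.floordiv_two_mid_bounds h
    set mid := PySem.Int.floordiv (s + e) 2 with hmiddef
    clear_value mid
    obtain ⟨hm1, hm2⟩ := hmid
    have hmid0 : 0 ≤ mid := by omega
    have hmidlt : mid < (a.length : Int) := by omega
    have hmt : mid.toNat < a.length := by omega
    rw [PySem.List.pyGet?_eq_some_getElem a hmid0 hmidlt]
    by_cases hv : a[mid.toNat] > target
    · simp only [if_pos hv]
      refine ih ((mid - 1) - s + 1).toNat (by omega) s (mid - 1) rfl hs0 (by omega) (by omega) hlo ?_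
      intro i hi hmi
      by_contra hc
      rcases lt_or_eq_of_le (show mid.toNat ≤ i by omega) with hlt | heq
      · exact absurd (hpair mid.toNat i hmt hi hlt (by omega)) (by omega)
      · subst heq; omega

    · simp only [if_neg hv]
      rw [not_lt] at hv
      refine ih (e - (mid + 1) + 1).toNat (by omega) (mid + 1) e rfl (by omega) (by omega) hel ?_ hhi
      intro i hi hmi
      rcases lt_or_eq_of_le (show i ≤ mid.toNat by omega) with hlt | heq
      · exact hpair i mid.toNat hi hmt hlt hv
      · subst heq; exact hv
  · simp only [dif_neg h]
    have hs : s.toNat ≤ a.length := by omega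
    rw [countP_of_split target a s.toNat hs]
    · omega
    · intro i hi his; exact hlo i hi (by omega)
    · intro i hi his; exact hhi i hi (by omega)

-- ===== VERDICT (by name: the statement is the Claim_ definition above) =====
theorem upper_bisect_spec : Claim_equal_upper_bisect := by
  intro a target _ hpre
  unfold Spec_upper_bisect upper_bisect upper_bisect_alt
  rw [foldl_count_acc, upperLoop_eq a target hpre 0 ((a.length : Int) - 1)
    (by omega) (by omega) (by omega)
    (by intro i hi h0; omega)
    (by intro i hi h0; omega)]
  omega
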